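-- pv_equiv track=rewrite | github.com/rramjee/PythonExperiments | Session6/session6.py | kind
-- ===== SOURCE A (Python) =====
-- def kind(n:'This variable tells the type of kind',ranks:'list of the rank of cards')->'list':
--     '''We are getting n which type of kind
--     Now take each type of number from ranks and count its presence
--     if it matches n then return true else false'''
--     '''for r in set(ranks):
--         if ranks.count(r) == n:
--             return True
--     return False'''
--     '''Another implementation
--     As we are assuming we are getting ranks in desc order
--     eg - [11, 2, 2, 1, 1]'''
--     for r in ranks:
--         if ranks.count(r) == n:
--             return r
--     return None
-- ===== SOURCE B (Python) =====
-- def kind(n, ranks):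
--     # Partition-based elimination: repeatedly take the leading value, split the
--     # remaining pool into its copies and everything else; the size of the "same"
--     # part is that value's full multiplicity. Return it if it equals n, else
--     # drop all its copies and continue with the rest of the pool.
--     rest = ranks
--     while rest:
--         r = rest[0]
--         same = [x for x in rest if x == r]
--         rest = [x for x in rest if x != r]
--         if len(same) == n:
--             return r
--     return None
-- ===== Notes on version B (the rewrite author's own statement) =====
-- stated objective: alternative
-- what changed: Replaces A's scan over all ranks with a repeated .count of the whole list by a partition-and-eliminate loop: split the shrinking pool into copies of its leading value (whose size is the multiplicity) and the remainder, returning the leader on a match and discarding all its copies otherwise.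
import Mathlib
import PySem

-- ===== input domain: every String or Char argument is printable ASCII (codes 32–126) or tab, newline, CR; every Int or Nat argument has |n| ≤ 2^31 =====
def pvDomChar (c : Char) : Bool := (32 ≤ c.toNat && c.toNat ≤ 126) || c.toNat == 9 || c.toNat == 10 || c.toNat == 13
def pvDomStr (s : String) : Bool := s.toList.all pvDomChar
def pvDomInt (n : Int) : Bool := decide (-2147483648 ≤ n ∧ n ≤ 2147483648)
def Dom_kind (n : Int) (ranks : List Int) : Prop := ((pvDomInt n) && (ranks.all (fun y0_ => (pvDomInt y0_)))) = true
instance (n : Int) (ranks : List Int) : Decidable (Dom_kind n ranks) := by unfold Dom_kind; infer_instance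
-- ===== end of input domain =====

-- B replaces A's scan with repeated full-list .count by a partition-and-eliminate
-- loop over a shrinking pool; the return value is unchanged (alternative algorithm).

-- ===== PORT A =====
-- 'for r in ranks: if ranks.count(r) == n: return r' / 'return None'
def kindLoopA (n : Int) (ranks : List Int) : List Int → Option Int
  | [] => none
  | r :: rest =>
      if ((PySem.List.count ranks r : Int) == n) then some r else kindLoopA n ranks rest

def kind (n : Int) (ranks : List Int) : Option Int :=
  kindLoopA n ranks ranks

-- ===== PORT B =====
-- while rest: r = rest[0]; same = [x for x in rest if x == r];
--             rest = [x for x in rest if x != r]; if len(same) == n: return r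
-- return None
def kindAltLoop (n : Int) : List Int → Option Int
  | [] => none
  | r :: t =>
      let same := (r :: t).filter (fun x => x == r)
      let rest' := (r :: t).filter (fun x => x != r)
      if ((same.length : Int) == n) then some r else kindAltLoop n rest'
termination_by rest => rest.length
decreasing_by
  simp only [List.filter_cons, bne_self_eq_false]
  exact Nat.lt_succ_of_le (List.length_filter_le _ _)

def kind_alt (n : Int) (ranks : List Int) : Option Int :=
  kindAltLoop n ranks

-- ===== PRECONDITION & SPEC =====
def Spec_kind (n : Int) (ranks : List Int) (out : Option Int) : Prop := out = kind_alt n ranks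
instance (n : Int) (ranks : List Int) (out : Option Int) : Decidable (Spec_kind n ranks out) := by unfold Spec_kind; infer_instance

-- ===== CLAIM (what is proved, stated in full; the proofs are below) =====
def Claim_equal_kind : Prop := ∀ (n : Int) (ranks : List Int), Dom_kind n ranks → Spec_kind n ranks (kind n ranks)

-- ===== LEMMAS AND PROOFS =====

-- A's loop is List.find? with the count predicate.
theorem kindLoopA_eq_find? (n : Int) (ranks rem : List Int) :
    kindLoopA n ranks rem = rem.find? (fun r => (PySem.List.count ranks r : Int) == n) := by
  induction rem with
  | nil => rfl
  | cons r rest ih =>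
      rw [List.find?]
      unfold kindLoopA
      cases h : ((PySem.List.count ranks r : Int) == n) with
      | true => simp
      | false => simp [ih]

-- Dropping only elements that fail P does not change find?.
theorem find?_filter_of_fail (P q : Int → Bool) (l : List Int)
    (h : ∀ x ∈ l, q x = false → P x = false) :
    (l.filter q).find? P = l.find? P := by
  induction l with
  | nil => rfl
  | cons x xs ih =>
      have ih' := ih (fun y hy => h y (List.mem_cons_of_mem _ hy))
      cases hq : q x with
      | true => simp [hq, List.find?, ih']
      | false =>
          have hx : P x = false := h x (List.mem_cons_self) hq
          simp [hq, List.find?, hx, ih']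

-- find? only looks at P on members.
theorem find?_congr_mem (P P' : Int → Bool) (l : List Int)
    (h : ∀ x ∈ l, P x = P' x) : l.find? P = l.find? P' := by
  induction l with
  | nil => rfl
  | cons x xs ih =>
      have hx := h x (List.mem_cons_self)
      simp only [List.find?, hx]
      cases P' x with
      | true => rfl
      | false => exact ih (fun y hy => h y (List.mem_cons_of_mem _ hy))

-- B's loop finds the first element whose multiplicity in the current pool is n.
theorem kindAltLoop_eq_find? (n : Int) (rest : List Int) :
    kindAltLoop n rest = rest.find? (fun x => ((rest.count x : Int)) == n) := by
  induction hlen : rest.length using Nat.strong_induction_on generalizing rest with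
  | _ k ih =>
      cases rest with
      | nil => simp [kindAltLoop]
      | cons r t =>
          unfold kindAltLoop
          show (if ((((r :: t).filter (fun x => x == r)).length : Int) == n) = true
                then some r else kindAltLoop n ((r :: t).filter (fun x => x != r)))
              = List.find? (fun x => ((r :: t).count x : Int) == n) (r :: t)
          have hsame : (((r :: t).filter (fun x => x == r)).length : Int)
              = ((r :: t).count r : Int) := by
            simp [List.count_eq_countP, List.countP_eq_length_filter]
          rw [hsame]
          by_cases hP : (((r :: t).count r : Int) == n) = true
          · rw [if_pos hP, List.find?]
            simp only [hP]
          · have hPf : (((r :: t).count r : Int) == n) = false := by simpa using hP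
            rw [if_neg hP]
            have hdec : ((r :: t).filter (fun x => x != r)).length < k := by
              subst hlen
              simp only [List.filter_cons, bne_self_eq_false]
              exact Nat.lt_succ_of_le (List.length_filter_le _ _)
            rw [ih _ hdec _ rfl]
            -- counts of survivors are unchanged by removing all copies of r
            have hc : ∀ x ∈ (r :: t).filter (fun x => x != r),
                ((((r :: t).filter (fun y => y != r)).count x : Int) == n)
                  = (((r :: t).count x : Int) == n) := by
              intro x hx
              have hxr : (x != r) = true := (List.mem_filter.mp hx).2
              have hcnt : (List.filter (fun y => y != r) (r :: t)).count x
                  = (r :: t).count x :=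
                List.count_filter (p := fun y => y != r) (l := r :: t) hxr
              rw [hcnt]
            rw [find?_congr_mem _ _ _ hc]
            apply find?_filter_of_fail
            intro x hx hq
            have hxr : x = r := by
              have : ¬ (x != r) = true := by simp [hq]
              simpa using this
            subst hxr
            exact hPf

-- ===== VERDICT (by name: the statement is the Claim_ definition above) =====
theorem kind_spec : Claim_equal_kind := by
  intro n ranks _
  show kind n ranks = kind_alt n ranks
  unfold kind kind_alt
  rw [kindLoopA_eq_find?, kindAltLoop_eq_find?]
  apply find?_congr_mem
  intro x _
  rw [PySem.List.count_eq]
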